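-- pv_equiv track=rewrite | github.com/RuanVitorr/atividades-de-Computabilidade-e-Complexidade-de-Algortimos | att12.py | afn_reconhece_substring_110
-- ===== SOURCE A (Python) =====
-- def afn_reconhece_substring_110(palavra):
--     estado = 'q0'
--
--     for char in palavra:
--         if estado == 'q0':
--             if char == '1':
--                 estado = 'q1'
--             elif char == '0':
--                 estado = 'q0'
--             else:
--                 return 'palavra invalida (caractere inválido)'
--         elif estado == 'q1':
--             if char == '1':
--                 estado = 'q2'
--             elif char == '0':
--                 estado = 'q0'
--             else:
--                 return 'palavra invalida (caractere inválido)'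
--         elif estado == 'q2':
--             if char == '0':
--                 estado = 'q3'
--             elif char == '1':
--                 estado = 'q2'
--             else:
--                 return 'palavra invalida (caractere inválido)'
--         elif estado == 'q3':
--             if char == '0' or char == '1':
--                 estado = 'q3'
--             else:
--                 return 'palavra invalida (caractere inválido)'
--
--     if estado == 'q3':
--         return "palavra valida (contém a substring '110')"
--     else:
--         return "palavra invalida (não contém a substring '110')"
-- ===== SOURCE B (Python) =====
-- def afn_reconhece_substring_110(palavra):
--     for char in palavra:
--         if char != '0' and char != '1':
--             return 'palavra invalida (caractere inválido)'
--     if '110' in ''.join(palavra):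
--         return "palavra valida (contém a substring '110')"
--     return "palavra invalida (não contém a substring '110')"
-- ===== Notes on version B (the rewrite author's own statement) =====
-- stated objective: simpler
-- what changed: Replaces the 4-state DFA with two phases: one validation loop over the characters, then a direct substring test '110' in the word.
import Mathlib
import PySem

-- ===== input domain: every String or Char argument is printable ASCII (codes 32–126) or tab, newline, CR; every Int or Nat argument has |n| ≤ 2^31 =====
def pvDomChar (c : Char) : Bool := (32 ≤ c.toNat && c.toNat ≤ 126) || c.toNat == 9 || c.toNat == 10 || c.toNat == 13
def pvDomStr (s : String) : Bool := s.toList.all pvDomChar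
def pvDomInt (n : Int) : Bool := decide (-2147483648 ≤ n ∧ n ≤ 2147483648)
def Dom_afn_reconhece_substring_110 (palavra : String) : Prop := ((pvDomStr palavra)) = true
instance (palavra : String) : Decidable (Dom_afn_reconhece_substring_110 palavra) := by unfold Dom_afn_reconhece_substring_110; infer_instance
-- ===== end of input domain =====

-- B replaces the hand-coded DFA by a validation pass followed by a direct substring search (simpler).


-- ===== PORT A =====
def afnGoA (estado : String) (cs : List Char) : String :=
  match cs with
  | [] =>
      if estado = "q3" then "palavra valida (contém a substring '110')"
      else "palavra invalida (não contém a substring '110')"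
  | c :: rest =>
      if estado = "q0" then
        if c = '1' then afnGoA "q1" rest
        else if c = '0' then afnGoA "q0" rest
        else "palavra invalida (caractere inválido)"
      else if estado = "q1" then
        if c = '1' then afnGoA "q2" rest
        else if c = '0' then afnGoA "q0" rest
        else "palavra invalida (caractere inválido)"
      else if estado = "q2" then
        if c = '0' then afnGoA "q3" rest
        else if c = '1' then afnGoA "q2" rest
        else "palavra invalida (caractere inválido)"
      else if estado = "q3" then
        if c = '0' ∨ c = '1' then afnGoA "q3" rest
        else "palavra invalida (caractere inválido)"
      else afnGoA estado rest

def afn_reconhece_substring_110 (palavra : String) : String :=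
  afnGoA "q0" palavra.toList

-- ===== PORT B =====
-- first phase: return the invalid-char message at the first non-binary char, else none
def afnCheckB (cs : List Char) : Option String :=
  match cs with
  | [] => none
  | c :: rest =>
      if c ≠ '0' ∧ c ≠ '1' then some "palavra invalida (caractere inválido)"
      else afnCheckB rest

-- second phase: Python's  '110' in s  (scan for the 3-char window)
def afnContains110 (cs : List Char) : Bool :=
  match cs with
  | '1' :: '1' :: '0' :: _ => true
  | _ :: rest => afnContains110 rest
  | [] => false

def afn_reconhece_substring_110_alt (palavra : String) : String :=
  match afnCheckB palavra.toList with
  | some e => e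
  | none =>
      if afnContains110 palavra.toList then "palavra valida (contém a substring '110')"
      else "palavra invalida (não contém a substring '110')"

-- ===== PRECONDITION & SPEC =====
def Spec_afn_reconhece_substring_110 (palavra : String) (out : String) : Prop := out = afn_reconhece_substring_110_alt palavra
instance (palavra : String) (out : String) : Decidable (Spec_afn_reconhece_substring_110 palavra out) := by unfold Spec_afn_reconhece_substring_110; infer_instance

-- ===== CLAIM (what is proved, stated in full; the proofs are below) =====
def Claim_equal_afn_reconhece_substring_110 : Prop := ∀ (palavra : String), Dom_afn_reconhece_substring_110 palavra → Spec_afn_reconhece_substring_110 palavra (afn_reconhece_substring_110 palavra)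

-- ===== LEMMAS AND PROOFS =====

def afnRes (cs : List Char) : String :=
  match afnCheckB cs with
  | some e => e
  | none =>
      if afnContains110 cs then "palavra valida (contém a substring '110')"
      else "palavra invalida (não contém a substring '110')"

lemma afn_key : ∀ cs : List Char,
    afnGoA "q0" cs = afnRes cs ∧
    afnGoA "q1" cs = afnRes ('1' :: cs) ∧
    afnGoA "q2" cs = afnRes ('1' :: '1' :: cs) ∧
    afnGoA "q3" cs = (match afnCheckB cs with
      | some e => e
      | none => "palavra valida (contém a substring '110')") := by
  intro cs
  induction cs with
  | nil => refine ⟨?_, ?_, ?_, ?_⟩ <;> simp [afnGoA, afnRes, afnCheckB, afnContains110]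
  | cons c rest ih =>
    obtain ⟨h0, h1, h2, h3⟩ := ih
    by_cases hc1 : c = '1'
    · subst hc1
      refine ⟨?_, ?_, ?_, ?_⟩ <;>
        simp [afnGoA, afnRes, afnCheckB, afnContains110, h1, h2, h3]
    · by_cases hc0 : c = '0'
      · subst hc0
        refine ⟨?_, ?_, ?_, ?_⟩ <;>
          simp [afnGoA, afnRes, afnCheckB, afnContains110, h0, h3]
      · refine ⟨?_, ?_, ?_, ?_⟩ <;>
          simp [afnGoA, afnRes, afnCheckB, hc0, hc1]

-- ===== VERDICT (by name: the statement is the Claim_ definition above) =====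
theorem afn_reconhece_substring_110_spec : Claim_equal_afn_reconhece_substring_110 := by
  intro palavra _
  unfold Spec_afn_reconhece_substring_110 afn_reconhece_substring_110 afn_reconhece_substring_110_alt
  rw [(afn_key palavra.toList).1]
  rfl
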